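-- pv_equiv track=rewrite | github.com/MalikHack007/CIM-JS-Scripts | lib/workReportGenerator.py | generate_work_report
-- ===== SOURCE A (Python) =====
-- def generate_work_report(data):
--  # Initialize the table with the opening <table> tag
--     html = '<table border="1" style="border-collapse: collapse; width: 100%; margin: 20px auto;">\n'
--
--     # Create the header row using the first element from each array
--     html += '  <thead>\n    <tr>\n'
--     for col in data:
--         # Use the first element from each array for the header
--         header_value = col[0] if col else 'No Header'
--         html += f'      <th style="padding: 10px; text-align: center;">{header_value}</th>\n'
--     html += '    </tr>\n  </thead>\n'
--
--     # Create the body of the table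
--     html += '  <tbody>\n'
--     # Get the number of rows by finding the maximum length of the subarrays
--     max_rows = max(len(col) for col in data)
--
--     for row_index in range(1, max_rows):  # Start from 1 to skip the header row
--         html += '    <tr>\n'
--         for col in data:
--             # Fill missing values with empty strings
--             value = col[row_index] if row_index < len(col) else ''
--             html += f'      <td style="padding: 10px; text-align: center; vertical-align: middle;">{value}</td>\n'
--         html += '    </tr>\n'
--
--     html += '  </tbody>\n'
--     html += '</table>\n'
--
--     return html
-- ===== SOURCE B (Python) =====
-- def generate_work_report(data):
--     # zip_longest-style head-peeling: no max(), no indices — body rows are made by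
--     # repeatedly splitting off the heads of the column tails until all are exhausted.
--     TH = '      <th style="padding: 10px; text-align: center;">{}</th>\n'
--     TD = '      <td style="padding: 10px; text-align: center; vertical-align: middle;">{}</td>\n'
--     head = ''.join(TH.format(c[0] if c else 'No Header') for c in data)
--     body = []
--     tails = [c[1:] for c in data]
--     while any(tails):
--         cells = ''.join(TD.format(t[0] if t else '') for t in tails)
--         body.append('    <tr>\n' + cells + '    </tr>\n')
--         tails = [t[1:] for t in tails]
--     return ('<table border="1" style="border-collapse: collapse; width: 100%; margin: 20px auto;">\n'
--             '  <thead>\n    <tr>\n' + head + '    </tr>\n  </thead>\n'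
--             '  <tbody>\n' + ''.join(body) + '  </tbody>\n</table>\n')
-- ===== Notes on version B (the rewrite author's own statement) =====
-- stated objective: alternative
-- what changed: B never computes max() or indexes columns: it renders body rows by zip_longest-style head-peeling of the column tails (while any(tails): emit heads, drop heads), accumulating row strings joined once, instead of A's max-length computation with a nested range/index loop over +=.
import Mathlib
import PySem

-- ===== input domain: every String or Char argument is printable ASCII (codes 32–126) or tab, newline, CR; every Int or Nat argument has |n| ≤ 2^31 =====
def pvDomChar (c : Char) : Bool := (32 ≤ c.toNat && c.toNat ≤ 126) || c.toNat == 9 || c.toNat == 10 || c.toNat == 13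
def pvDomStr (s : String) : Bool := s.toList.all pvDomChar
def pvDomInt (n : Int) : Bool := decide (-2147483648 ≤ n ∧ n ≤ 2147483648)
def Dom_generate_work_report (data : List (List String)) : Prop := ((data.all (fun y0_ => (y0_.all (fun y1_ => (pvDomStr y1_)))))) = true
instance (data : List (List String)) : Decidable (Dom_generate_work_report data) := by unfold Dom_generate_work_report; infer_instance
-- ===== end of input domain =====

-- B renders the body by zip_longest-style head-peeling of the column tails (no max(), no
-- indices), joining row strings once, instead of A's max-length + nested index loop. (objective: alternative)

-- shared output literals (identical text in both Pythons)
def pvTableOpen : String := "<table border=\"1\" style=\"border-collapse: collapse; width: 100%; margin: 20px auto;\">\n"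
def pvThCell (h : String) : String := "      <th style=\"padding: 10px; text-align: center;\">" ++ h ++ "</th>\n"
def pvTdCell (v : String) : String := "      <td style=\"padding: 10px; text-align: center; vertical-align: middle;\">" ++ v ++ "</td>\n"
def pvHeaderVal (col : List String) : String := match col with | [] => "No Header" | x :: _ => x
def pvHeadD (t : List String) : String := match t with | [] => "" | x :: _ => x

-- termination measure lemmas for the head-peeling loop (cited by pvPeelBody's decreasing_by)
theorem pv_tail_sum_le : ∀ (l : List (List String)),
    ((l.map List.tail).map List.length).sum ≤ (l.map List.length).sum := by
  intro l
  induction l with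
  | nil => simp
  | cons b m ihm =>
    simp only [List.map_cons, List.sum_cons]
    have : b.tail.length ≤ b.length := by cases b <;> simp
    omega

theorem pv_peel_measure : ∀ (ts : List (List String)), ts.any (fun t => !t.isEmpty) = true →
    ((ts.map List.tail).map List.length).sum < (ts.map List.length).sum := by
  intro ts h
  induction ts with
  | nil => simp at h
  | cons a l ih =>
    simp only [List.any_cons, Bool.or_eq_true] at h
    cases a with
    | nil =>
      have h' : l.any (fun t => !t.isEmpty) = true := by simpa using h
      simpa using ih h'
    | cons x xs =>
      have := pv_tail_sum_le l
      simp only [List.map_cons, List.sum_cons, List.tail_cons, List.length_cons]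
      omega

-- ===== PORT A =====
def generate_work_report (data : List (List String)) : String :=
  let html := pvTableOpen
  let html := html ++ "  <thead>\n    <tr>\n"
  let html := data.foldl (fun h col => h ++ pvThCell (pvHeaderVal col)) html
  let html := html ++ "    </tr>\n  </thead>\n"
  let html := html ++ "  <tbody>\n"
  match PySem.List.max? (data.map (fun col => (col.length : Int))) (fun x => x) with
  | none => ""   -- Python raises ValueError here (max() of empty sequence); excluded by Pre_
  | some maxRows =>
    let html := (PySem.List.pyRange 1 maxRows 1).foldl (fun h i =>
      let h := h ++ "    <tr>\n"
      let h := data.foldl (fun h col =>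
        h ++ pvTdCell (if i < (col.length : Int) then PySem.List.pyGetD col i "" else "")) h
      h ++ "    </tr>\n") html
    html ++ "  </tbody>\n" ++ "</table>\n"

-- ===== PORT B =====
-- the 'while any(tails)' head-peeling loop of Source B
def pvPeelBody (tails : List (List String)) : String :=
  if h : tails.any (fun t => !t.isEmpty) = true then
    "    <tr>\n" ++ String.join (tails.map (fun t => pvTdCell (pvHeadD t))) ++ "    </tr>\n"
      ++ pvPeelBody (tails.map List.tail)
  else ""
termination_by (tails.map List.length).sum
decreasing_by simpa using pv_peel_measure tails h

def generate_work_report_alt (data : List (List String)) : String :=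
  let head := String.join (data.map (fun c => pvThCell (pvHeaderVal c)))
  let body := pvPeelBody (data.map (fun c => PySem.List.slice c (some 1) none))
  pvTableOpen ++ "  <thead>\n    <tr>\n" ++ head ++ "    </tr>\n  </thead>\n" ++
    "  <tbody>\n" ++ body ++ "  </tbody>\n</table>\n"

-- ===== PRECONDITION & SPEC =====
-- Pre_ excludes exactly the empty column list, on which Python A raises ValueError (max() of an empty sequence).
def Pre_generate_work_report (data : List (List String)) : Prop := data ≠ []
instance (data : List (List String)) : Decidable (Pre_generate_work_report data) := by unfold Pre_generate_work_report; infer_instance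
def pvWitness_generate_work_report : List (List String) := [["h", "a", "b"], ["k"]]

def Spec_generate_work_report (data : List (List String)) (out : String) : Prop := out = generate_work_report_alt data
instance (data : List (List String)) (out : String) : Decidable (Spec_generate_work_report data out) := by unfold Spec_generate_work_report; infer_instance

-- ===== CLAIM (what is proved, stated in full; the proofs are below) =====
def Claim_equal_generate_work_report : Prop := ∀ (data : List (List String)), Dom_generate_work_report data → Pre_generate_work_report data → Spec_generate_work_report data (generate_work_report data)

-- ===== LEMMAS AND PROOFS =====

theorem pv_join_nil : String.join ([] : List String) = "" := rfl

theorem pv_join_shift : ∀ (l : List String) (s : String),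
    l.foldl (fun a b => a ++ b) s = s ++ String.join l := by
  intro l
  induction l with
  | nil => intro s; rw [List.foldl_nil, pv_join_nil]; simp
  | cons a t ih =>
    intro s
    have e : ("" ++ a : String) = a := by simp
    have h1 : String.join (a :: t) = List.foldl (fun x y => x ++ y) a t := by
      simp only [String.join, List.foldl_cons, e]
    rw [List.foldl_cons, ih (s ++ a), h1, ih a, String.append_assoc]

theorem pv_join_cons (a : String) (l : List String) :
    String.join (a :: l) = a ++ String.join l := by
  have e : ("" ++ a : String) = a := by simp
  have h1 : String.join (a :: l) = List.foldl (fun x y => x ++ y) a l := by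
    simp only [String.join, List.foldl_cons, e]
  rw [h1, pv_join_shift l a]

theorem pv_foldl_str_append {α : Type} (f : α → String) :
    ∀ (l : List α) (s : String), l.foldl (fun h x => h ++ f x) s = s ++ String.join (l.map f) := by
  intro l
  induction l with
  | nil => intro s; rw [List.foldl_nil, List.map_nil, pv_join_nil]; simp
  | cons a t ih =>
    intro s
    simp only [List.foldl_cons, List.map_cons, ih, pv_join_cons, String.append_assoc]

theorem pv_cast_foldl_max {α : Type} (f : α → Nat) :
    ∀ (l : List α) (a : Nat),
      List.foldl max (a : Int) (l.map (fun x => ((f x : Nat) : Int))) = ((List.foldl max a (l.map f) : Nat) : Int) := by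
  intro l
  induction l with
  | nil => intro a; simp
  | cons x t ih =>
    intro a
    simp only [List.map_cons, List.foldl_cons]
    rw [← Nat.cast_max]
    exact ih (max a (f x))

theorem pv_sub_foldl_max : ∀ (l : List Nat) (a : Nat),
    List.foldl max (a - 1) (l.map (fun x => x - 1)) = List.foldl max a l - 1 := by
  intro l
  induction l with
  | nil => intro a; simp
  | cons x t ih =>
    intro a
    simp only [List.map_cons, List.foldl_cons, ← ih (max a x)]
    congr 1
    omega

theorem pv_getD_tail (col : List String) (k : Nat) :
    col.tail.getD k "" = col.getD (k + 1) "" := by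
  cases col <;> simp [List.getD]

-- A's body cell at row 1+k of col equals getD k on col's tail
theorem pv_cell_eq (col : List String) (k : Nat) :
    (if ((1 : Int) + (k : Int)) < (col.length : Int) then PySem.List.pyGetD col ((1 : Int) + (k : Int)) "" else "")
      = col.tail.getD k "" := by
  have h1 : ((1 : Int) + (k : Int)) = ((k + 1 : Nat) : Int) := by omega
  rw [h1, PySem.List.pyGetD_natCast, pv_getD_tail]
  by_cases h : ((k + 1 : Nat) : Int) < (col.length : Int)
  · rw [if_pos h]
  · rw [if_neg h]
    have hle : col.length ≤ k + 1 := by omega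
    simp [List.getD_eq_getElem?_getD, List.getElem?_eq_none hle]

-- max column length, as B's peeling sees it
def pvMaxLen (ts : List (List String)) : Nat := List.foldl max 0 (ts.map List.length)

theorem pv_foldl_max_base : ∀ (l : List Nat) (b : Nat), b ≤ l.foldl max b := by
  intro l
  induction l with
  | nil => intro b; simp
  | cons a m ih =>
    intro b
    exact le_trans (le_max_left b a) (ih (max b a))

theorem pv_le_foldl_max : ∀ (l : List Nat) (a b : Nat), a ∈ l → a ≤ l.foldl max b := by
  intro l
  induction l with
  | nil => intro a b h; simp at h
  | cons c m ih =>
    intro a b h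
    rcases List.mem_cons.mp h with h | h
    · subst h
      exact le_trans (le_max_right b a) (pv_foldl_max_base m (max b a))
    · exact ih a (max b c) h

theorem pv_maxLen_zero (ts : List (List String))
    (h : ts.any (fun t => !t.isEmpty) = false) : pvMaxLen ts = 0 := by
  unfold pvMaxLen
  induction ts with
  | nil => rfl
  | cons a l ih =>
    simp only [List.any_cons, Bool.or_eq_false_iff] at h
    have ha : a.length = 0 := by cases a <;> simp_all
    have := ih h.2
    simp only [List.map_cons, List.foldl_cons, ha, Nat.max_self] at *
    simpa using this

theorem pv_maxLen_tail (ts : List (List String)) :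
    pvMaxLen (ts.map List.tail) = pvMaxLen ts - 1 := by
  unfold pvMaxLen
  have h : (ts.map List.tail).map List.length = (ts.map List.length).map (fun x => x - 1) := by
    simp only [List.map_map]; congr 1; funext t; simp
  rw [h]
  have h0 : (0 : Nat) = 0 - 1 := rfl
  rw [h0, pv_sub_foldl_max]

theorem pv_maxLen_pos (ts : List (List String)) (h : ts.any (fun t => !t.isEmpty) = true) :
    1 ≤ pvMaxLen ts := by
  rcases List.any_eq_true.mp h with ⟨t, ht, hne⟩
  have hlen : 1 ≤ t.length := by cases t <;> simp_all
  have hmem : t.length ∈ ts.map List.length := List.mem_map.mpr ⟨t, ht, rfl⟩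
  have := pv_le_foldl_max (ts.map List.length) t.length 0 hmem
  unfold pvMaxLen
  omega

-- peeling = join of the rows indexed 0 .. pvMaxLen ts - 1
theorem pv_peel_eq (ts : List (List String)) :
    pvPeelBody ts = String.join ((List.range (pvMaxLen ts)).map (fun k =>
      "    <tr>\n" ++ String.join (ts.map (fun t => pvTdCell (t.getD k ""))) ++ "    </tr>\n")) := by
  generalize hn : pvMaxLen ts = n
  induction n generalizing ts with
  | zero =>
    rw [pvPeelBody]
    have hfalse : ts.any (fun t => !t.isEmpty) = false := by
      by_contra h
      have h' : ts.any (fun t => !t.isEmpty) = true := by simpa using h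
      have := pv_maxLen_pos ts h'
      omega
    simp [hfalse, pv_join_nil]
  | succ m ih =>
    rw [pvPeelBody]
    have hany : ts.any (fun t => !t.isEmpty) = true := by
      by_contra h
      have h' : ts.any (fun t => !t.isEmpty) = false := by simpa using h
      have := pv_maxLen_zero ts h'
      omega
    rw [dif_pos hany]
    have htail : pvMaxLen (ts.map List.tail) = m := by
      rw [pv_maxLen_tail, hn]; omega
    rw [ih _ htail]
    rw [List.range_succ_eq_map, List.map_cons, pv_join_cons]
    have hrow : List.map (fun t => pvTdCell (pvHeadD t)) ts
        = List.map (fun t : List String => pvTdCell (t.getD 0 "")) ts :=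
      List.map_congr_left (fun t _ => by cases t <;> simp [pvHeadD, List.getD])
    rw [hrow]
    congr 1
    congr 1
    rw [List.map_map]
    apply List.map_congr_left
    intro k _
    simp only [Function.comp_def, List.map_map, pv_getD_tail]

theorem pv_main (c : List String) (cs : List (List String)) :
    generate_work_report (c :: cs) = generate_work_report_alt (c :: cs) := by
  unfold generate_work_report generate_work_report_alt
  simp only [List.map_cons, PySem.List.max?_id_cons, PySem.List.slice_from_one,
    PySem.List.pyRange_one, pv_foldl_str_append, pv_join_cons, String.append_assoc]
  rw [pv_peel_eq]
  have hmax : pvMaxLen (c.tail :: cs.map List.tail) =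
      ((cs.map (fun col : List String => (col.length : Int))).foldl max (c.length : Int) - 1).toNat := by
    rw [pv_cast_foldl_max List.length cs c.length]
    have h2 : pvMaxLen (c.tail :: cs.map List.tail) = pvMaxLen (c :: cs) - 1 := by
      have := pv_maxLen_tail (c :: cs); simpa using this
    rw [h2]
    unfold pvMaxLen
    simp only [List.map_cons, List.foldl_cons, Nat.zero_max]
    omega
  rw [hmax]
  have e2 : ("  </tbody>\n</table>\n" : String) = "  </tbody>\n" ++ "</table>\n" := rfl
  rw [e2, List.map_map]
  simp only [List.map_cons, pv_join_cons, List.map_map, Function.comp_def, pv_cell_eq, String.append_assoc]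

-- ===== VERDICT (by name: the statement is the Claim_ definition above) =====
theorem generate_work_report_spec : Claim_equal_generate_work_report := by
  intro data _ hpre
  unfold Spec_generate_work_report
  match data with
  | [] => exact absurd rfl hpre
  | c :: cs => exact pv_main c cs
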